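-- pv_equiv track=rewrite | github.com/pypi-data/pypi-mirror-399 | packages/boto3-assist/boto3_assist-0.35.0-py3-none-any.whl/boto3_assist/utilities/serialization_utility.py | remove_collisions
-- ===== SOURCE A (Python) =====
-- from typing import Any, Dict, List, TypeVar
--
-- def remove_collisions(
--     data: List[Dict[str, Any]], collisions: List[str]
-- ) -> List[Dict[str, Any]]:
--     """
--     Removes collisions from a list of dictionaries.
--
--     :param data: List of dictionaries
--     :param collisions: List of collision keys
--     :return: List of dictionaries with collisions removed
--     """
--     for c in collisions:
--         for r in data:
--             if c in r:
--                 del r[c]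
--     return data
-- ===== SOURCE B (Python) =====
-- def remove_collisions(data, collisions):
--     """Rebuild each dict without collision keys in one pass over a collision set.
--     Note: replaces the dict objects inside `data` (data[:] = ...) instead of
--     mutating them key by key; the returned value is the same."""
--     cset = set(collisions)
--     out = []
--     for r in data:
--         out.append({k: v for k, v in r.items() if k not in cset})
--     data[:] = out
--     return data
-- ===== Notes on version B (the rewrite author's own statement) =====
-- stated objective: faster
-- what changed: Instead of rescanning every dict once per collision key, B builds a set of collision keys once and rebuilds each dict in a single comprehension pass keeping only non-collision keys, splicing the new dicts back into the list.
import Mathlib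
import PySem

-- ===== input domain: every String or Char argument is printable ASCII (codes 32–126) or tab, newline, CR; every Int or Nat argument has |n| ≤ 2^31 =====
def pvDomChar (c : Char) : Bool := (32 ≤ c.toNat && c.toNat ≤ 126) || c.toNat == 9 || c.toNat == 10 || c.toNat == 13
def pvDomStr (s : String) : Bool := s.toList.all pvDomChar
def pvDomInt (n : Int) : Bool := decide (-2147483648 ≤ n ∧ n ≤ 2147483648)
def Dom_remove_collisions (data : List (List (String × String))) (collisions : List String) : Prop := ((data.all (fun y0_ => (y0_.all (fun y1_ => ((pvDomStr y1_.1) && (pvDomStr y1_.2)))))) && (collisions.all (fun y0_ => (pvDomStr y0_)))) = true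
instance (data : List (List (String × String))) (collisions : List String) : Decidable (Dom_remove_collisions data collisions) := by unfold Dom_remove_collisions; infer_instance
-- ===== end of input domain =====

-- B builds a collision-key set once and rebuilds each dict in one pass (measured faster);
-- B replaces the dict objects inside the list rather than deleting keys in place — the RETURN value is what is proved equal.

-- ===== PORT A =====
-- outer loop over collisions, inner loop over data; 'if c in r: del r[c]' = drop the pairs keyed c when present
def remove_collisions (data : List (List (String × String))) (collisions : List String) : List (List (String × String)) :=
  collisions.foldl (fun d c =>
    d.map (fun r => if r.any (fun kv => kv.1 == c) then r.filter (fun kv => kv.1 != c) else r)) data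

-- ===== PORT B =====
-- the dict comprehension '{k: v for k, v in r.items() if k not in cset}' as structural recursion over the pairs
def pvCleanDict (cset : PySem.Set String) : List (String × String) → List (String × String)
  | [] => []
  | kv :: rest =>
      if PySem.Set.contains cset kv.1 then pvCleanDict cset rest
      else kv :: pvCleanDict cset rest

-- the 'for r in data: out.append(...)' loop building 'out' front-to-back
def pvCleanAll (cset : PySem.Set String) : List (List (String × String)) → List (List (String × String))
  | [] => []
  | r :: rest => pvCleanDict cset r :: pvCleanAll cset rest

-- cset = set(collisions); out = cleaned dicts; data[:] = out; return data
def remove_collisions_alt (data : List (List (String × String))) (collisions : List String) : List (List (String × String)) :=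
  pvCleanAll (PySem.Set.ofList collisions) data

-- ===== PRECONDITION & SPEC =====
def Spec_remove_collisions (data : List (List (String × String))) (collisions : List String) (out : List (List (String × String))) : Prop := out = remove_collisions_alt data collisions
instance (data : List (List (String × String))) (collisions : List String) (out : List (List (String × String))) : Decidable (Spec_remove_collisions data collisions out) := by unfold Spec_remove_collisions; infer_instance

-- ===== CLAIM (what is proved, stated in full; the proofs are below) =====
def Claim_equal_remove_collisions : Prop := ∀ (data : List (List (String × String))) (collisions : List String), Dom_remove_collisions data collisions → Spec_remove_collisions data collisions (remove_collisions data collisions)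

-- ===== LEMMAS AND PROOFS =====

-- A's per-dict step: the 'c in r' guard is redundant for the resulting value
lemma stepA_eq_filter (c : String) (r : List (String × String)) :
    (if r.any (fun kv => kv.1 == c) then r.filter (fun kv => kv.1 != c) else r)
      = r.filter (fun kv => kv.1 != c) := by
  by_cases h : r.any (fun kv => kv.1 == c)
  · simp [h]
  · rw [if_neg h, Eq.comm, List.filter_eq_self]
    intro kv hkv
    rw [bne_iff_ne]
    intro he
    exact h (List.any_eq_true.mpr ⟨kv, hkv, by simp [he]⟩)

-- swap the foldl-over-collisions with the map-over-data
lemma foldl_map_swap (cs : List String) (data : List (List (String × String))) :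
    cs.foldl (fun d c =>
      d.map (fun r => if r.any (fun kv => kv.1 == c) then r.filter (fun kv => kv.1 != c) else r)) data
    = data.map (fun r => cs.foldl
        (fun r c => if r.any (fun kv => kv.1 == c) then r.filter (fun kv => kv.1 != c) else r) r) := by
  induction cs generalizing data with
  | nil => simp
  | cons c cs ih => simp [List.foldl_cons, ih, List.map_map]

-- folding per-key filters equals one filter by list membership
lemma foldl_filter_eq (cs : List String) (r : List (String × String)) :
    cs.foldl (fun r c => if r.any (fun kv => kv.1 == c) then r.filter (fun kv => kv.1 != c) else r) r
    = r.filter (fun kv => !cs.contains kv.1) := by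
  induction cs generalizing r with
  | nil => simp
  | cons c cs ih =>
    rw [List.foldl_cons, stepA_eq_filter, ih, List.filter_filter]
    apply List.filter_congr
    intro kv _
    by_cases h1 : kv.1 = c <;> by_cases h2 : kv.1 ∈ cs <;> simp [h1, h2, bne]

-- set membership agrees with list membership
lemma set_contains_eq (cs : List String) (x : String) :
    PySem.Set.contains (PySem.Set.ofList cs) x = cs.contains x := by
  simp only [PySem.Set.contains_eq_listContains]
  by_cases h : x ∈ cs
  · simp [(PySem.Set.mem_ofList cs x).mpr h, h]
  · simp [PySem.Set.mem_ofList, h]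

-- B's per-dict recursion computes the membership filter
lemma cleanDict_eq_filter (cs : List String) (r : List (String × String)) :
    pvCleanDict (PySem.Set.ofList cs) r = r.filter (fun kv => !cs.contains kv.1) := by
  induction r with
  | nil => rfl
  | cons kv rest ih =>
    rw [pvCleanDict, List.filter_cons, set_contains_eq, ih]
    by_cases h : cs.contains kv.1 = true <;> simp [h]

-- B's outer recursion is a map
lemma cleanAll_eq_map (cset : PySem.Set String) (data : List (List (String × String))) :
    pvCleanAll cset data = data.map (pvCleanDict cset) := by
  induction data with
  | nil => rfl
  | cons r rest ih => rw [pvCleanAll, ih, List.map_cons]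

-- ===== VERDICT (by name: the statement is the Claim_ definition above) =====
theorem remove_collisions_spec : Claim_equal_remove_collisions := by
  intro data collisions _
  unfold Spec_remove_collisions remove_collisions remove_collisions_alt
  rw [foldl_map_swap, cleanAll_eq_map]
  apply List.map_congr_left
  intro r _
  rw [foldl_filter_eq, cleanDict_eq_filter]
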